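-- pv_equiv track=rewrite | github.com/Ekaterina363/module_2_6 | module _2_6.py | parol
-- ===== SOURCE A (Python) =====
-- def parol(n):
--     if n > 2 and n < 21:
--         password = ""
--         for x_ in range(1, n):
--             for x_2 in range(1, n):
--                 if n % (x_ + x_2) ==0:
--                     if x_ < x_2:
--                         password += f"{x_}, {x_2}"
--         return password
--     else:
--         return  "Неверный дтапозон"
-- ===== SOURCE B (Python) =====
-- def parol(n):
--     if not (2 < n < 21):
--         return "Неверный дтапозон"
--     divisors = [d for d in range(1, n + 1) if n % d == 0]
--     parts = []
--     for x1 in range(1, n):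
--         for d in divisors:
--             x2 = d - x1
--             if x1 < x2 and x2 <= n - 1:
--                 parts.append(f"{x1}, {x2}")
--     return "".join(parts)
-- ===== Notes on version B (the rewrite author's own statement) =====
-- stated objective: alternative
-- what changed: Replaces the inner scan over all x2 in range(1,n) with modulo tests by a precomputed ascending divisor list of n, deriving x2 = d - x1 with bound checks, and joins collected parts instead of string concatenation.
import Mathlib
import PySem

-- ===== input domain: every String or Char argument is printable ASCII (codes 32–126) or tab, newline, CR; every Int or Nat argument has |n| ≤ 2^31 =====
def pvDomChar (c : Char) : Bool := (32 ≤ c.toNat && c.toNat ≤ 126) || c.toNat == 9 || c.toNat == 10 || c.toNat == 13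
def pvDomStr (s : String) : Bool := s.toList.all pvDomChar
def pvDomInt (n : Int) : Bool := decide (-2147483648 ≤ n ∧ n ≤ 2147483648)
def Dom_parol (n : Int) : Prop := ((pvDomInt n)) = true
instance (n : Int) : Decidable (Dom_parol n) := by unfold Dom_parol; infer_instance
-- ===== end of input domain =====

-- B replaces the quadratic inner scan over all x2 by iterating the precomputed ascending divisor list of n (alternative decomposition; n < 21 so no speed claim).

-- ===== PORT A =====
def parol (n : Int) : String :=
  if n > 2 ∧ n < 21 then
    (PySem.List.pyRange 1 n 1).foldl (fun password x1 =>
      (PySem.List.pyRange 1 n 1).foldl (fun password x2 =>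
        if PySem.Int.mod n (x1 + x2) = 0 then
          if x1 < x2 then
            password ++ PySem.Int.toStr x1 ++ ", " ++ PySem.Int.toStr x2
          else password
        else password) password) ""
  else "Неверный дтапозон"

-- ===== PORT B =====
def parol_alt (n : Int) : String :=
  if n > 2 ∧ n < 21 then
    let divisors := (PySem.List.pyRange 1 (n + 1) 1).filter (fun d => PySem.Int.mod n d = 0)
    let parts := (PySem.List.pyRange 1 n 1).foldl (fun parts x1 =>
      divisors.foldl (fun parts d =>
        let x2 := d - x1
        if x1 < x2 ∧ x2 ≤ n - 1 then
          parts ++ [PySem.Int.toStr x1 ++ ", " ++ PySem.Int.toStr x2]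
        else parts) parts) ([] : List String)
    PySem.Str.join "" parts
  else "Неверный дтапозон"

-- ===== PRECONDITION & SPEC =====
def Spec_parol (n : Int) (out : String) : Prop := out = parol_alt n
instance (n : Int) (out : String) : Decidable (Spec_parol n out) := by unfold Spec_parol; infer_instance

-- ===== CLAIM (what is proved, stated in full; the proofs are below) =====
def Claim_equal_parol : Prop := ∀ (n : Int), Dom_parol n → Spec_parol n (parol n)

-- ===== LEMMAS AND PROOFS =====

-- ===== VERDICT (by name: the statement is the Claim_ definition above) =====
theorem parol_spec : Claim_equal_parol := by
  intro n _
  unfold Spec_parol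
  by_cases h : n > 2 ∧ n < 21
  · obtain ⟨h1, h2⟩ := h
    interval_cases n <;> decide
  · simp [parol, parol_alt, h]
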